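-- pv_equiv track=rewrite | github.com/Esahte/COMP1210_codes | Tutorials/Tut0/BasicPrograming/#3 Seconds.py | seconds
-- ===== SOURCE A (Python) =====
-- def seconds(initSecs):
--     secs = initSecs
--     timeRange = {'hour':0, 'minute':0, 'second':0}
--
--     while secs != 0:
--         while secs % 60 != 0:
--             timeRange['second'] += 1
--             secs -= 1
--         secs = secs//60
--         while secs%60 != 0:
--             timeRange['minute'] += 1
--             secs -= 1
--         timeRange['hour'] += secs//60
--         break
--
--     # list to store keys in dictionary with values
--     timeLst = []
--     # iterates through dictionary to extract keys with values
--     for (k, v) in timeRange.items():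
--         if v != 0:
--             timeLst.append(k)
--
--     # stores initial list size
--     initialLen = False
--     if len(timeLst) == 1: initialLen = True
--
--     # creates statement to be returned
--     statement = f'{initSecs} sec is '
--     while len(timeLst)>1:
--         if timeRange[timeLst[0]] > 1: statement += f'{timeRange[timeLst[0]]} {timeLst.pop(0)}s, '
--         else: statement += f'{timeRange[timeLst[0]]} {timeLst.pop(0)}, '
--     if timeRange[timeLst[0]] == 1 and initialLen: statement += f'{timeRange[timeLst[0]]} {timeLst.pop(0)}'
--     elif timeRange[timeLst[0]] > 1 and initialLen: statement += f'{timeRange[timeLst[0]]} {timeLst.pop(0)}s'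
--
--     elif timeRange[timeLst[0]] > 1: statement += f'and {timeRange[timeLst[0]]} {timeLst.pop(0)}s'
--     else: statement += f'and {timeRange[timeLst[0]]} {timeLst.pop(0)}'
--
--     return statement
-- ===== SOURCE B (Python) =====
-- def seconds(initSecs):
--     # closed-form divmod decomposition instead of A's decrement loops;
--     # single-pass string assembly instead of A's pop-loop over a dict
--     h, rem = divmod(initSecs, 3600)
--     m, s = divmod(rem, 60)
--     units = [(name, v) for name, v in (('hour', h), ('minute', m), ('second', s)) if v != 0]
--
--     def word(name, v):
--         return f"{v} {name}" + ("s" if v > 1 else "")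
--
--     *init, (lastName, lastVal) = units  # ValueError on initSecs == 0 (A raises IndexError there)
--     body = "".join(word(name, v) + ", " for name, v in init)
--     if len(units) == 1 and lastVal >= 1:
--         tail = word(lastName, lastVal)
--     else:
--         tail = "and " + word(lastName, lastVal)
--     return f"{initSecs} sec is " + body + tail
-- ===== Notes on version B (the rewrite author's own statement) =====
-- stated objective: simpler
-- what changed: Replaces A's decrement-by-one counting loops over a mutable dict and its pop(0)-driven sentence loop by a closed-form divmod decomposition into (hour, minute, second) and a single join over the nonzero (name, value) pairs.
-- outside the precondition, e.g. on seconds(0): A raises IndexError, B raises ValueError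
import Mathlib
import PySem

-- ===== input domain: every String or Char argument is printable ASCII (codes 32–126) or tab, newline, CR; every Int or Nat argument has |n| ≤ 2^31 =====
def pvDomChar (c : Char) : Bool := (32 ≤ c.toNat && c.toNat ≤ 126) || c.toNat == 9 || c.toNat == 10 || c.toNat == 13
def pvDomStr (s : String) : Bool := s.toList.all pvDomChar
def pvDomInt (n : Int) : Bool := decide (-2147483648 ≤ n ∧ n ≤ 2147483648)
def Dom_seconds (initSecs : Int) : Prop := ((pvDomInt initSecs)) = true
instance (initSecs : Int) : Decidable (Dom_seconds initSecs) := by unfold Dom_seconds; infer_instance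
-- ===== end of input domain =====

-- B replaces A's decrement-by-one counting loops and dict/pop sentence loop by a closed-form
-- divmod decomposition and one join over the nonzero (name, value) pairs (objective: simpler).

-- ===== PORT A =====
-- the inner 'while secs % 60 != 0: timeRange[key] += 1; secs -= 1' loops (key = 'second' / 'minute')
def pvCountDown (key : String) (secs : Int) (d : PySem.Dict String Int) : Int × PySem.Dict String Int :=
  if PySem.Int.mod secs 60 ≠ 0 then
    pvCountDown key (secs - 1) (PySem.Dict.modify d key 0 (· + 1))
  else (secs, d)
termination_by (PySem.Int.mod secs 60).toNat
decreasing_by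
  simp only [PySem.Int.mod_eq_emod_of_pos (by omega : (0:Int) < 60)] at *
  omega

-- the 'while len(timeLst) > 1' statement loop (value read first, then timeLst.pop(0))
def pvStmtLoop (d : PySem.Dict String Int) (lst : List String) (st : String) : List String × String :=
  match lst with
  | a :: b :: rest =>
      let v := PySem.Dict.getD d a 0
      if v > 1 then pvStmtLoop d (b :: rest) (st ++ PySem.Int.toStr v ++ " " ++ a ++ "s, ")
      else pvStmtLoop d (b :: rest) (st ++ PySem.Int.toStr v ++ " " ++ a ++ ", ")
  | _ => (lst, st)

def seconds (initSecs : Int) : String :=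
  let timeRange : PySem.Dict String Int :=
    PySem.Dict.mk [("hour", 0), ("minute", 0), ("second", 0)]
  -- 'while secs != 0: … break' runs its body at most once
  let sd :=
    if initSecs ≠ 0 then
      let sd1 := pvCountDown "second" initSecs timeRange
      let secs1 := PySem.Int.floordiv sd1.1 60
      let sd2 := pvCountDown "minute" secs1 sd1.2
      (sd2.1, PySem.Dict.modify sd2.2 "hour" 0 (· + PySem.Int.floordiv sd2.1 60))
    else (initSecs, timeRange)
  let timeRange := sd.2
  let timeLst := timeRange.items.foldl
    (fun acc kv => if kv.2 ≠ 0 then acc ++ [kv.1] else acc) ([] : List String)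
  let initialLen : Bool := timeLst.length == 1
  let statement := PySem.Int.toStr initSecs ++ " sec is "
  let ls := pvStmtLoop timeRange timeLst statement
  -- timeLst[0]: raises IndexError on the empty list (initSecs = 0), excluded by Pre_seconds;
  -- the "" default is never read under Pre_seconds
  let a := ls.1.headD ""
  let v := PySem.Dict.getD timeRange a 0
  if v = 1 ∧ initialLen = true then ls.2 ++ PySem.Int.toStr v ++ " " ++ a
  else if v > 1 ∧ initialLen = true then ls.2 ++ PySem.Int.toStr v ++ " " ++ a ++ "s"
  else if v > 1 then ls.2 ++ "and " ++ PySem.Int.toStr v ++ " " ++ a ++ "s"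
  else ls.2 ++ "and " ++ PySem.Int.toStr v ++ " " ++ a

-- ===== PORT B =====
def pvWord (name : String) (v : Int) : String :=
  PySem.Int.toStr v ++ " " ++ name ++ (if v > 1 then "s" else "")

def seconds_alt (initSecs : Int) : String :=
  let h := PySem.Int.floordiv initSecs 3600
  let rem := PySem.Int.mod initSecs 3600
  let m := PySem.Int.floordiv rem 60
  let s := PySem.Int.mod rem 60
  let units := [("hour", h), ("minute", m), ("second", s)].filter (fun p => p.2 ≠ 0)
  -- '*init, (lastName, lastVal) = units' raises ValueError on units = [] (initSecs = 0): excluded by Pre_seconds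
  match units.getLast? with
  | none => ""
  | some (lastName, lastVal) =>
    let body := PySem.Str.join "" (units.dropLast.map (fun p => pvWord p.1 p.2 ++ ", "))
    let tail := if units.length = 1 ∧ 1 ≤ lastVal then pvWord lastName lastVal
                else "and " ++ pvWord lastName lastVal
    PySem.Int.toStr initSecs ++ " sec is " ++ body ++ tail

-- ===== PRECONDITION & SPEC =====
-- Pre_ excludes exactly initSecs = 0, where A raises IndexError (B raises ValueError there too).
def Pre_seconds (initSecs : Int) : Prop := initSecs ≠ 0
instance (initSecs : Int) : Decidable (Pre_seconds initSecs) := by unfold Pre_seconds; infer_instance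
def pvWitness_seconds : Int := 61

def Spec_seconds (initSecs : Int) (out : String) : Prop := out = seconds_alt initSecs
instance (initSecs : Int) (out : String) : Decidable (Spec_seconds initSecs out) := by unfold Spec_seconds; infer_instance

-- ===== CLAIM (what is proved, stated in full; the proofs are below) =====
def Claim_equal_seconds : Prop := ∀ (initSecs : Int), Dom_seconds initSecs → Pre_seconds initSecs → Spec_seconds initSecs (seconds initSecs)

-- ===== LEMMAS AND PROOFS =====

theorem pv_modify_modify (d : PySem.Dict String Int) (k : String) (f g : Int → Int) :
    PySem.Dict.modify (PySem.Dict.modify d k 0 f) k 0 g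
      = PySem.Dict.modify d k 0 (fun v => g (f v)) := by
  simp [PySem.Dict.modify, PySem.Dict.insert_insert_self]

theorem pvCountDown_eq (key : String) (secs : Int) (d : PySem.Dict String Int) :
    pvCountDown key secs d
      = (secs - PySem.Int.mod secs 60,
         if PySem.Int.mod secs 60 = 0 then d
         else PySem.Dict.modify d key 0 (· + PySem.Int.mod secs 60)) := by
  fun_induction pvCountDown key secs d with
  | case1 secs d h ih =>
      rw [ih]
      have hm : PySem.Int.mod (secs - 1) 60 = PySem.Int.mod secs 60 - 1 := by
        simp only [PySem.Int.mod_eq_emod_of_pos (show (0:Int) < 60 by omega)] at h ⊢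
        omega
      rw [hm]
      simp only [Prod.mk.injEq]
      refine ⟨by omega, ?_⟩
      rw [if_neg h]
      by_cases h1 : PySem.Int.mod secs 60 = 1
      · rw [if_pos (by omega), h1]
      · rw [if_neg (by omega), pv_modify_modify]
        have hf : (fun v : Int => v + 1 + (PySem.Int.mod secs 60 - 1))
             = (fun v : Int => v + PySem.Int.mod secs 60) := by funext v; omega
        rw [hf]
  | case2 secs d h =>
      simp only [ne_eq, not_not] at h
      rw [h, if_pos rfl]
      simp

-- ===== VERDICT (by name: the statement is the Claim_ definition above) =====
set_option maxHeartbeats 2000000 in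
set_option maxRecDepth 8192 in
theorem seconds_spec : Claim_equal_seconds := by
  intro n _ hn
  replace hn : n ≠ 0 := hn
  unfold Spec_seconds
  have h60 : (0:Int) < 60 := by omega
  have h36 : (0:Int) < 3600 := by omega
  simp only [seconds, seconds_alt, pvCountDown_eq]
  rw [if_pos hn]
  simp only [PySem.Int.mod_eq_emod_of_pos h60, PySem.Int.mod_eq_emod_of_pos h36,
    PySem.Int.floordiv_eq_ediv_of_pos h60, PySem.Int.floordiv_eq_ediv_of_pos h36]
  rw [show (n - n % 60) / 60 = n / 60 from by omega]
  rw [show (n / 60 - n / 60 % 60) / 60 = n / 3600 from by omega]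
  rw [show n % 3600 / 60 = n / 60 % 60 from by omega,
      show n % 3600 % 60 = n % 60 from by omega]
  rcases eq_or_ne (n / 3600) 0 with hH | hH <;>
    rcases eq_or_ne (n / 60 % 60) 0 with hM | hM <;>
      rcases eq_or_ne (n % 60) 0 with hS | hS
  · exact absurd (by omega) hn
  all_goals
    simp [hH, hM, hS, PySem.Dict.modify, PySem.Dict.insert,
      PySem.Dict.getD, PySem.Dict.get?_mk_cons, pvStmtLoop, pvWord, PySem.Str.join]
  all_goals
    refine String.toList_inj.mp ?_
    simp [apply_ite String.toList, apply_ite (Prod.fst (α := List String) (β := String)),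
      apply_ite (Prod.snd (α := List String) (β := String)),
      String.toList_append, PySem.Int.toList_toStr,
      PySem.Chars.join_singleton, PySem.Chars.join_cons_cons]
    split_ifs <;>
      first
        | omega
        | simp
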